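-- pv_equiv track=rewrite | github.com/ZzJRui/Audio-extraction-and-translation-tools | subtitle.py | _merge_short_pieces
-- ===== SOURCE A (Python) =====
-- MIN_CJK_CHUNK_LENGTH = 6
--
-- MIN_LATIN_CHUNK_WORDS = 2
--
-- MIN_LATIN_CHUNK_LENGTH = 8
--
-- def _contains_cjk(text: str) -> bool:
--     return any("\u4e00" <= char <= "\u9fff" for char in text)
--
-- def _normalize_whitespace(text: str) -> str:
--     return " ".join(text.split()) if not _contains_cjk(text) else text.strip()
--
-- def _join_pieces(left: str, right: str) -> str:
--     if not left:
--         return right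
--     if not right:
--         return left
--     if _contains_cjk(left) or _contains_cjk(right):
--         return f"{left}{right}"
--     return " ".join([left, right]).strip()
--
-- def _is_too_short_piece(text: str) -> bool:
--     cleaned = _normalize_whitespace(text)
--     if not cleaned:
--         return True
--     if _contains_cjk(cleaned):
--         return len(cleaned) < MIN_CJK_CHUNK_LENGTH
--     return len(cleaned.split()) < MIN_LATIN_CHUNK_WORDS or len(cleaned) < MIN_LATIN_CHUNK_LENGTH
--
-- def _merge_short_pieces(pieces: list[str]) -> list[str]:
--     merged = [piece for piece in pieces if piece]
--     changed = True
--     while changed and len(merged) > 1: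
--         changed = False
--         for index, piece in enumerate(list(merged)):
--             if not _is_too_short_piece(piece):
--                 continue
--             if index == 0:
--                 merged[1] = _join_pieces(merged[0], merged[1])
--                 del merged[0]
--             elif index == len(merged) - 1:
--                 merged[-2] = _join_pieces(merged[-2], merged[-1])
--                 del merged[-1]
--             else:
--                 merged[index + 1] = _join_pieces(merged[index], merged[index + 1])
--                 del merged[index]
--             changed = True
--             break
--     return merged
-- ===== SOURCE B (Python) =====
-- MIN_CJK_CHUNK_LENGTH = 6
--
-- MIN_LATIN_CHUNK_WORDS = 2
--
-- MIN_LATIN_CHUNK_LENGTH = 8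
--
-- def _contains_cjk(text: str) -> bool:
--     return any("\u4e00" <= char <= "\u9fff" for char in text)
--
-- def _normalize_whitespace(text: str) -> str:
--     return " ".join(text.split()) if not _contains_cjk(text) else text.strip()
--
-- def _join_pieces(left: str, right: str) -> str:
--     if not left:
--         return right
--     if not right:
--         return left
--     if _contains_cjk(left) or _contains_cjk(right):
--         return f"{left}{right}"
--     return " ".join([left, right]).strip()
--
-- def _is_too_short_piece(text: str) -> bool:
--     cleaned = _normalize_whitespace(text)
--     if not cleaned:
--         return True
--     if _contains_cjk(cleaned):
--         return len(cleaned) < MIN_CJK_CHUNK_LENGTH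
--     return len(cleaned.split()) < MIN_LATIN_CHUNK_WORDS or len(cleaned) < MIN_LATIN_CHUNK_LENGTH
--
-- def _merge_short_pieces(pieces: list[str]) -> list[str]:
--     # single forward pass: a short accumulated piece absorbs the next piece;
--     # then a trailing short piece folds back into its predecessor
--     merged = []
--     for piece in pieces:
--         if not piece:
--             continue
--         if merged and _is_too_short_piece(merged[-1]):
--             merged[-1] = _join_pieces(merged[-1], piece)
--         else:
--             merged.append(piece)
--     while len(merged) > 1 and _is_too_short_piece(merged[-1]):
--         merged[-1] = _join_pieces(merged[-2], merged[-1])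
--         del merged[-2]
--     return merged
-- ===== Notes on version B (the rewrite author's own statement) =====
-- stated objective: faster
-- what changed: Replaced the restart-from-scratch fixpoint loop (rescan the whole list after every single merge, with list copies and deletes) by one forward pass whose last accumulated piece absorbs the next piece while too short, plus a small backward loop folding a short trailing piece into its predecessor.
import Mathlib
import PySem

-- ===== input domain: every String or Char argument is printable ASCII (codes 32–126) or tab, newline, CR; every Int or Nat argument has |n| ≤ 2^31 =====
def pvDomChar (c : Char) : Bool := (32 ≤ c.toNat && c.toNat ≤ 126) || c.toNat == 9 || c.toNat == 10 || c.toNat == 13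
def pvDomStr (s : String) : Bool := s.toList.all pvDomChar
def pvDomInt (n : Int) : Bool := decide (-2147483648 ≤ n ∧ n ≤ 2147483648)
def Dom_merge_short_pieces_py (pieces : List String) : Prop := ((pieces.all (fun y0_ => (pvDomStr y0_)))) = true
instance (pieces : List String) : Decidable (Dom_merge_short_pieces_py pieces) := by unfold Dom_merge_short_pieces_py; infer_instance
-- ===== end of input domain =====

-- B replaces A's restart-the-scan fixpoint loop by a single forward pass with an
-- accumulator plus a backward fold of a short trailing piece (objective: faster).

-- ===== shared module helpers (used verbatim by both Pythons) =====

-- _contains_cjk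
def pvContainsCJK (text : String) : Bool :=
  text.toList.any (fun c => 0x4e00 ≤ c.toNat && c.toNat ≤ 0x9fff)

-- _normalize_whitespace
def pvNormalizeWS (text : String) : String :=
  if !pvContainsCJK text then PySem.Str.join " " (PySem.Str.split₀ text)
  else PySem.Str.strip text

-- _join_pieces
def pvJoinPieces (left right : String) : String :=
  if left = "" then right
  else if right = "" then left
  else if pvContainsCJK left || pvContainsCJK right then left ++ right
  else PySem.Str.strip (PySem.Str.join " " [left, right])

-- _is_too_short_piece
def pvTooShort (text : String) : Bool :=
  let cleaned := pvNormalizeWS text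
  if cleaned = "" then true
  else if pvContainsCJK cleaned then decide (PySem.Str.len cleaned < 6)
  else decide ((PySem.Str.split₀ cleaned).length < 2) || decide (PySem.Str.len cleaned < 8)

-- ===== PORT A =====

-- the body of A's `for index, piece in enumerate(list(merged))` loop: scan left to
-- right past the non-short prefix; on the first short piece perform the branch A
-- performs (merge into the next piece, or — for a short LAST piece — into the
-- previous one) and report the changed list; `none` = no short piece, changed stays False
def pvAStep : List String → Option (List String)
  | x :: y :: rest =>
    if pvTooShort x then some (pvJoinPieces x y :: rest)
    else if rest.isEmpty then
      if pvTooShort y then some [pvJoinPieces x y] else none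
    else (pvAStep (y :: rest)).map (fun r => x :: r)
  | _ => none

theorem pvAStep_length : ∀ (m r : List String), pvAStep m = some r → r.length + 1 = m.length
  | [], r => by intro h; simp [pvAStep] at h
  | [x], r => by intro h; simp [pvAStep] at h
  | x :: y :: rest, r => by
    intro h
    simp only [pvAStep] at h
    by_cases hx : pvTooShort x = true
    · simp only [hx, if_true] at h
      cases h; simp
    · simp only [hx] at h
      cases rest with
      | nil =>
        simp only [List.isEmpty_nil, if_true] at h
        split_ifs at h <;> (cases h; simp)
      | cons z rs =>
        simp only [List.isEmpty_cons, if_false, Bool.false_eq_true, Option.map_eq_some_iff] at h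
        obtain ⟨r', hr', rfl⟩ := h
        have := pvAStep_length (y :: z :: rs) r' hr'
        simp at this ⊢; omega

-- A's `while changed and len(merged) > 1` loop
def pvALoop (m : List String) : List String :=
  if 1 < m.length then
    match hstep : pvAStep m with
    | some r => pvALoop r
    | none => m
  else m
termination_by m.length
decreasing_by have := pvAStep_length m r hstep; omega

def merge_short_pieces_py (pieces : List String) : List String :=
  pvALoop (pieces.filter (fun p => p != ""))

-- ===== PORT B =====

-- B's forward for-loop; `racc` is the `merged` list in reversed order (head = merged[-1])
def pvBPass : List String → List String → List String
  | racc, [] => racc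
  | racc, p :: rest =>
    if p = "" then pvBPass racc rest
    else
      match racc with
      | t :: ts =>
        if pvTooShort t then pvBPass (pvJoinPieces t p :: ts) rest
        else pvBPass (p :: t :: ts) rest
      | [] => pvBPass [p] rest

-- B's trailing while-loop (still on the reversed list)
def pvBTail : List String → List String
  | t :: u :: ts => if pvTooShort t then pvBTail (pvJoinPieces u t :: ts) else t :: u :: ts
  | l => l
termination_by l => l.length

def merge_short_pieces_py_alt (pieces : List String) : List String :=
  (pvBTail (pvBPass [] pieces)).reverse

-- ===== PRECONDITION & SPEC =====
def Spec_merge_short_pieces_py (pieces : List String) (out : List String) : Prop := out = merge_short_pieces_py_alt pieces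
instance (pieces : List String) (out : List String) : Decidable (Spec_merge_short_pieces_py pieces out) := by unfold Spec_merge_short_pieces_py; infer_instance

-- ===== CLAIM (what is proved, stated in full; the proofs are below) =====
def Claim_equal_merge_short_pieces_py : Prop := ∀ (pieces : List String), Dom_merge_short_pieces_py pieces → Spec_merge_short_pieces_py pieces (merge_short_pieces_py pieces)

-- ===== LEMMAS AND PROOFS =====

-- no short piece anywhere: the scan reports nothing
theorem pvAStep_none : ∀ (m : List String), (∀ x ∈ m, pvTooShort x = false) → pvAStep m = none
  | [], _ => rfl
  | [x], _ => rfl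
  | x :: y :: rest, h => by
    have hx : pvTooShort x = false := h x (by simp)
    have hy : pvTooShort y = false := h y (by simp)
    match rest with
    | [] => simp [pvAStep, hx, hy]
    | z :: rs =>
      have hrec := pvAStep_none (y :: z :: rs) (fun a ha => h a (by simp at ha ⊢; tauto))
      rw [pvAStep]
      simp [hx, hrec]

-- first short piece t is followed by p: A merges t into p
theorem pvAStep_mid : ∀ (pre : List String) (t p : String) (rs : List String),
    (∀ x ∈ pre, pvTooShort x = false) → pvTooShort t = true →
    pvAStep (pre ++ t :: p :: rs) = some (pre ++ pvJoinPieces t p :: rs)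
  | [], t, p, rs, _, ht => by simp [pvAStep, ht]
  | a :: pre, t, p, rs, h, ht => by
    have ha : pvTooShort a = false := h a (by simp)
    have ih := pvAStep_mid pre t p rs (fun x hx => h x (by simp [hx])) ht
    match pre with
    | [] => simp [pvAStep, ha, ht]
    | b :: pre' =>
      simp only [List.cons_append] at ih ⊢
      rw [pvAStep]
      simp [ha, ih]

-- first short piece t is LAST, preceded by u: A merges t into u
theorem pvAStep_last : ∀ (pre : List String) (u t : String),
    (∀ x ∈ pre, pvTooShort x = false) → pvTooShort u = false → pvTooShort t = true →
    pvAStep (pre ++ [u, t]) = some (pre ++ [pvJoinPieces u t])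
  | [], u, t, _, hu, ht => by simp [pvAStep, hu, ht]
  | a :: pre, u, t, h, hu, ht => by
    have ha : pvTooShort a = false := h a (by simp)
    have ih := pvAStep_last pre u t (fun x hx => h x (by simp [hx])) hu ht
    match pre with
    | [] => simp [pvAStep, ha, hu, ht]
    | b :: pre' =>
      simp only [List.cons_append] at ih ⊢
      rw [pvAStep]
      simp [ha, ih]

theorem pvALoop_of_none {m : List String} (h : pvAStep m = none) : pvALoop m = m := by
  rw [pvALoop]; split_ifs with h1
  · split <;> simp_all
  · rfl

theorem pvAStep_some_len {m r : List String} (h : pvAStep m = some r) : 1 < m.length := by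
  match m with
  | [] => simp [pvAStep] at h
  | [x] => simp [pvAStep] at h
  | _ :: _ :: _ => simp

theorem pvALoop_step {m r : List String} (h : pvAStep m = some r) : pvALoop m = pvALoop r := by
  rw [pvALoop]
  simp only [pvAStep_some_len h, if_pos]
  split <;> simp_all

-- the trailing phase: on a reversed list whose tail holds no short piece,
-- A's loop coincides with B's backward fold
theorem pvTail_agree : ∀ (l : List String), (∀ x ∈ l.tail, pvTooShort x = false) →
    pvALoop l.reverse = (pvBTail l).reverse
  | [], _ => by simp [pvALoop, pvBTail]
  | [t], _ => by simp [pvALoop, pvBTail]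
  | t :: u :: ts, h => by
    have hu : pvTooShort u = false := h u (by simp)
    have hts : ∀ x ∈ ts, pvTooShort x = false := fun x hx => h x (by simp [hx])
    by_cases ht : pvTooShort t = true
    · have step : pvAStep ((t :: u :: ts).reverse) = some (ts.reverse ++ [pvJoinPieces u t]) := by
        have := pvAStep_last ts.reverse u t (by simpa using hts) hu ht
        simpa using this
      rw [pvALoop_step step]
      have : ts.reverse ++ [pvJoinPieces u t] = (pvJoinPieces u t :: ts).reverse := by simp
      rw [this, pvTail_agree (pvJoinPieces u t :: ts) (by simpa using hts)]
      rw [pvBTail]; simp [ht]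
    · have hnone : pvAStep ((t :: u :: ts).reverse) = none := by
        apply pvAStep_none
        intro x hx
        simp only [List.mem_reverse, List.mem_cons] at hx
        rcases hx with rfl | rfl | hx
        · exact eq_false_of_ne_true ht
        · exact hu
        · exact hts x hx
      rw [pvALoop_of_none hnone, pvBTail]
      simp [ht]
termination_by l => l.length

-- the forward phase: while `rest` remains, A's loop and B's pass walk in lockstep;
-- `l` (reversed) is B's accumulator, whose tail never holds a short piece
theorem pvMain : ∀ (rest l : List String), (∀ x ∈ l.tail, pvTooShort x = false) →
    pvALoop (l.reverse ++ rest.filter (fun p => p != "")) = (pvBTail (pvBPass l rest)).reverse := by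
  intro rest
  induction rest with
  | nil => intro l h; simpa [pvBPass] using pvTail_agree l h
  | cons p rest ih =>
    intro l h
    by_cases hp : p = ""
    · subst hp
      have : pvBPass l ("" :: rest) = pvBPass l rest := by
        match l with
        | [] => simp [pvBPass]
        | _ :: _ => simp [pvBPass]
      rw [this]
      simpa using ih l h
    · have hfil : (p :: rest).filter (fun p => p != "") = p :: rest.filter (fun p => p != "") := by
        simp [hp]
      rw [hfil]
      match l with
      | [] =>
        have : pvBPass [] (p :: rest) = pvBPass [p] rest := by simp [pvBPass, hp]
        rw [this]
        simpa using ih [p] (by simp)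
      | t :: ts =>
        have hts : ∀ x ∈ ts, pvTooShort x = false := fun x hx => h x (by simp [hx])
        by_cases ht : pvTooShort t = true
        · have hb : pvBPass (t :: ts) (p :: rest) = pvBPass (pvJoinPieces t p :: ts) rest := by
            simp [pvBPass, hp, ht]
          rw [hb]
          have step : pvAStep ((t :: ts).reverse ++ p :: rest.filter (fun p => p != ""))
              = some (ts.reverse ++ pvJoinPieces t p :: rest.filter (fun p => p != "")) := by
            have := pvAStep_mid ts.reverse t p (rest.filter (fun p => p != ""))
              (by simpa using hts) ht
            simpa using this
          rw [pvALoop_step step]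
          have harr : ts.reverse ++ pvJoinPieces t p :: rest.filter (fun p => p != "")
              = (pvJoinPieces t p :: ts).reverse ++ rest.filter (fun p => p != "") := by simp
          rw [harr]
          exact ih (pvJoinPieces t p :: ts) (by simpa using hts)
        · have hb : pvBPass (t :: ts) (p :: rest) = pvBPass (p :: t :: ts) rest := by
            simp [pvBPass, hp, ht]
          rw [hb]
          have harr : (t :: ts).reverse ++ p :: rest.filter (fun p => p != "")
              = (p :: t :: ts).reverse ++ rest.filter (fun p => p != "") := by simp
          rw [harr]
          apply ih (p :: t :: ts)
          intro x hx
          simp only [List.tail_cons, List.mem_cons] at hx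
          rcases hx with rfl | hx
          · simpa using ht
          · exact hts x hx

-- ===== VERDICT (by name: the statement is the Claim_ definition above) =====
theorem merge_short_pieces_py_spec : Claim_equal_merge_short_pieces_py := by
  intro pieces _
  unfold Spec_merge_short_pieces_py merge_short_pieces_py merge_short_pieces_py_alt
  simpa using pvMain pieces [] (by simp)
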